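-- pv_equiv track=rewrite | github.com/LXZE/AOC_2019 | 22/22_2.py | polynompow
-- ===== SOURCE A (Python) =====
-- n_card = 119315717514047
--
-- def polynompow(a, b, multiplier):
-- 	if multiplier == 0:
-- 		return 1, 0
-- 	if multiplier % 2 == 0:
-- 		return polynompow((a*a) % n_card, ((a*b)+b) % n_card, multiplier//2)
-- 	else:
-- 		c, d = polynompow(a, b, multiplier-1)
-- 		return (a*c) % n_card, ((a*d)+b) % n_card
-- ===== SOURCE B (Python) =====
-- n_card = 119315717514047
--
-- def polynompow(a, b, multiplier):
--     # Iterative binary exponentiation of the linear map x -> a*x + b (mod n_card).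
--     ra, rb = 1, 0          # result: identity map
--     ba, bb = a, b          # base: the map itself
--     while multiplier > 0:
--         if multiplier % 2 == 1:
--             ra, rb = (ba * ra) % n_card, (ba * rb + bb) % n_card
--         ba, bb = (ba * ba) % n_card, (ba * bb + bb) % n_card
--         multiplier //= 2
--     return ra, rb
-- ===== Notes on version B (the rewrite author's own statement) =====
-- stated objective: alternative
-- what changed: A's even/odd recursion on the exponent is replaced by an iterative result/base binary-exponentiation loop over the linear map x -> a*x + b mod n_card; powers of one affine map commute, so the composition order does not matter.
import Mathlib
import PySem

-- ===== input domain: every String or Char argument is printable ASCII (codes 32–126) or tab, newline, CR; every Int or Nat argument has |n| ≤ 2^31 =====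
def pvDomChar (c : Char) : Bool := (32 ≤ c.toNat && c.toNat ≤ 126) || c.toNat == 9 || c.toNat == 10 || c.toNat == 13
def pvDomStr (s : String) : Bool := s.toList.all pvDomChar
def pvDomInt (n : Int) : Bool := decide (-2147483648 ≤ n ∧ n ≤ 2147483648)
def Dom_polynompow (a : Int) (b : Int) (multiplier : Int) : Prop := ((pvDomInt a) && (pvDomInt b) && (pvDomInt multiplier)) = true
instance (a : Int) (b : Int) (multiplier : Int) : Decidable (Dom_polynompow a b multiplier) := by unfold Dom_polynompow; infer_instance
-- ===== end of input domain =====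

-- B replaces A's mixed even/odd recursion by iterative binary exponentiation of the
-- linear map x ↦ a*x+b (an accumulator/base loop); objective: alternative decomposition.

def nCard : Int := 119315717514047

-- termination lemmas cited by the ports' decreasing_by (kept term-small on purpose)
theorem pvPosOfNe (m : Int) (h1 : ¬ m = 0) (h2 : ¬ m < 0) : 0 < m :=
  lt_of_le_of_ne (not_lt.mp h2) (fun e => h1 e.symm)
theorem pvHalfLtToNat (m : Int) (hm : 0 < m) : (PySem.Int.floordiv m 2).toNat < m.toNat := by
  rw [PySem.Int.floordiv_eq_ediv_of_pos two_pos]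
  exact (Int.toNat_lt_toNat hm).mpr ((Int.ediv_lt_iff_lt_mul two_pos).mpr ((lt_mul_iff_one_lt_right hm).mpr one_lt_two))
theorem pvPredLtToNat (m : Int) (hm : 0 < m) : (m - 1).toNat < m.toNat :=
  (Int.toNat_lt_toNat hm).mpr (sub_one_lt m)

-- ===== PORT A =====
def polynompow (a : Int) (b : Int) (multiplier : Int) : Int × Int :=
  if multiplier = 0 then (1, 0)
  else if multiplier < 0 then (1, 0)  -- totality guard only: Python recurses forever here (outside Pre_)
  else if PySem.Int.mod multiplier 2 = 0 then
    polynompow (PySem.Int.mod (a * a) nCard) (PySem.Int.mod (a * b + b) nCard) (PySem.Int.floordiv multiplier 2)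
  else
    let cd := polynompow a b (multiplier - 1)
    (PySem.Int.mod (a * cd.1) nCard, PySem.Int.mod (a * cd.2 + b) nCard)
termination_by multiplier.toNat
decreasing_by
  · exact pvHalfLtToNat multiplier (pvPosOfNe multiplier ‹_› ‹_›)
  · exact pvPredLtToNat multiplier (pvPosOfNe multiplier ‹_› ‹_›)

-- ===== PORT B =====
def polynompowLoop (ra : Int) (rb : Int) (ba : Int) (bb : Int) (multiplier : Int) : Int × Int :=
  if multiplier ≤ 0 then (ra, rb)
  else
    let ra' := if PySem.Int.mod multiplier 2 = 1 then PySem.Int.mod (ba * ra) nCard else ra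
    let rb' := if PySem.Int.mod multiplier 2 = 1 then PySem.Int.mod (ba * rb + bb) nCard else rb
    polynompowLoop ra' rb' (PySem.Int.mod (ba * ba) nCard) (PySem.Int.mod (ba * bb + bb) nCard)
      (PySem.Int.floordiv multiplier 2)
termination_by multiplier.toNat
decreasing_by
  exact pvHalfLtToNat multiplier (not_le.mp ‹_›)

def polynompow_alt (a : Int) (b : Int) (multiplier : Int) : Int × Int :=
  polynompowLoop 1 0 a b multiplier

-- ===== PRECONDITION & SPEC =====
-- Pre_ excludes multiplier < 0, where the Python A recurses forever (RecursionError).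
def Pre_polynompow (a : Int) (b : Int) (multiplier : Int) : Prop := 0 ≤ multiplier
instance (a : Int) (b : Int) (multiplier : Int) : Decidable (Pre_polynompow a b multiplier) := by
  unfold Pre_polynompow; infer_instance
def pvWitness_polynompow : Int × Int × Int := (3, 5, 10)

def Spec_polynompow (a : Int) (b : Int) (multiplier : Int) (out : Int × Int) : Prop := out = polynompow_alt a b multiplier
instance (a : Int) (b : Int) (multiplier : Int) (out : Int × Int) : Decidable (Spec_polynompow a b multiplier out) := by unfold Spec_polynompow; infer_instance

-- ===== CLAIM (what is proved, stated in full; the proofs are below) =====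
def Claim_equal_polynompow : Prop := ∀ (a : Int) (b : Int) (multiplier : Int), Dom_polynompow a b multiplier → Pre_polynompow a b multiplier → Spec_polynompow a b multiplier (polynompow a b multiplier)

-- ===== LEMMAS AND PROOFS =====

theorem pvModN (x : Int) : PySem.Int.mod x nCard = x % nCard :=
  PySem.Int.mod_eq_emod_of_pos (by norm_num [nCard])

theorem pvMod2 (x : Int) : PySem.Int.mod x 2 = x % 2 :=
  PySem.Int.mod_eq_emod_of_pos (by norm_num)

theorem pvDiv2 (x : Int) : PySem.Int.floordiv x 2 = x / 2 :=
  PySem.Int.floordiv_eq_ediv_of_pos (by norm_num)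

-- geometric sum 1 + a + … + a^(k-1)
def G (a : Int) : Nat → Int
  | 0 => 0
  | k + 1 => 1 + a * G a k

theorem G_succ_right (a : Int) (k : Nat) : G a (k + 1) = G a k + a ^ k := by
  induction k with
  | zero => simp [G]
  | succ k ih =>
    show 1 + a * G a (k + 1) = (1 + a * G a k) + a ^ (k + 1)
    rw [ih]; ring

theorem G_double (a : Int) (k : Nat) : G a (2 * k) = (1 + a) * G (a * a) k := by
  induction k with
  | zero => simp [G]
  | succ k ih =>
    have h : 2 * (k + 1) = 2 * k + 1 + 1 := by ring
    rw [h]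
    show 1 + a * (1 + a * G a (2 * k)) = (1 + a) * G (a * a) (k + 1)
    rw [ih]; show _ = (1 + a) * (1 + a * a * G (a * a) k); ring

theorem memod (x : Int) : x % nCard ≡ x [ZMOD nCard] :=
  Int.emod_emod_of_dvd x dvd_rfl

theorem G_modeq {a a' : Int} (h : a ≡ a' [ZMOD nCard]) (k : Nat) :
    G a k ≡ G a' k [ZMOD nCard] := by
  induction k with
  | zero => rfl
  | succ k ih => exact (Int.ModEq.refl 1).add (h.mul ih)

theorem A_closed : ∀ (k : Nat) (m : Int), m.toNat = k → 1 ≤ m → ∀ a b : Int,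
    polynompow a b m = (a ^ m.toNat % nCard, b * G a m.toNat % nCard) := by
  intro k
  induction k using Nat.strong_induction_on with
  | _ k ih =>
    intro m hk hm a b
    rw [polynompow, if_neg (by omega : ¬ m = 0), if_neg (by omega : ¬ m < 0)]
    simp only [pvModN, pvMod2, pvDiv2]
    by_cases hpar : m % 2 = 0
    · rw [if_pos hpar]
      have h1 : (1 : Int) ≤ m / 2 := by omega
      have hk2 : (m / 2).toNat < k := by omega
      rw [ih _ hk2 (m / 2) rfl h1]
      have h2k : m.toNat = 2 * (m / 2).toNat := by omega
      rw [h2k]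
      set k2 := (m / 2).toNat with hk2def
      refine Prod.ext ?_ ?_
      · show (a * a % nCard) ^ k2 % nCard = a ^ (2 * k2) % nCard
        calc (a * a % nCard) ^ k2 ≡ (a * a) ^ k2 [ZMOD nCard] := (memod _).pow k2
          _ = a ^ (2 * k2) := by rw [pow_mul]; ring_nf
      · show (a * b + b) % nCard * G (a * a % nCard) k2 % nCard = b * G a (2 * k2) % nCard
        calc (a * b + b) % nCard * G (a * a % nCard) k2
            ≡ (a * b + b) * G (a * a) k2 [ZMOD nCard] := (memod _).mul (G_modeq (memod _) k2)
          _ = b * G a (2 * k2) := by rw [G_double]; ring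
    · rw [if_neg hpar]
      by_cases h1 : m = 1
      · subst h1
        rw [polynompow]
        norm_num [G]
      · have hm2 : (1 : Int) ≤ m - 1 := by omega
        have hk' : (m - 1).toNat < k := by omega
        rw [ih _ hk' (m - 1) rfl hm2]
        have ht : m.toNat = (m - 1).toNat + 1 := by omega
        rw [ht]
        set t := (m - 1).toNat with htdef
        refine Prod.ext ?_ ?_
        · show a * (a ^ t % nCard) % nCard = a ^ (t + 1) % nCard
          calc a * (a ^ t % nCard) ≡ a * a ^ t [ZMOD nCard] := (Int.ModEq.refl a).mul (memod _)
            _ = a ^ (t + 1) := by ring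
        · show (a * (b * G a t % nCard) + b) % nCard = b * G a (t + 1) % nCard
          calc a * (b * G a t % nCard) + b
              ≡ a * (b * G a t) + b [ZMOD nCard] := ((Int.ModEq.refl a).mul (memod _)).add (Int.ModEq.refl b)
            _ = b * G a (t + 1) := by show _ = b * (1 + a * G a t); ring

theorem B_closed : ∀ (k : Nat) (m : Int), m.toNat = k → 1 ≤ m → ∀ ra rb ba bb : Int,
    polynompowLoop ra rb ba bb m
      = ((ba ^ m.toNat * ra) % nCard, (ba ^ m.toNat * rb + bb * G ba m.toNat) % nCard) := by
  intro k
  induction k using Nat.strong_induction_on with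
  | _ k ih =>
    intro m hk hm ra rb ba bb
    rw [polynompowLoop, if_neg (by omega : ¬ m ≤ 0)]
    simp only [pvModN, pvMod2, pvDiv2]
    by_cases h1 : m = 1
    · subst h1
      norm_num
      rw [polynompowLoop]
      norm_num [G]
    · have h2 : (1 : Int) ≤ m / 2 := by omega
      have hk2 : (m / 2).toNat < k := by omega
      by_cases hpar : m % 2 = 1
      · rw [if_pos hpar, if_pos hpar, ih _ hk2 (m / 2) rfl h2]
        have h2k : m.toNat = 2 * (m / 2).toNat + 1 := by omega
        rw [h2k]
        set k2 := (m / 2).toNat with hk2def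
        refine Prod.ext ?_ ?_
        · show (ba * ba % nCard) ^ k2 * (ba * ra % nCard) % nCard
            = ba ^ (2 * k2 + 1) * ra % nCard
          calc (ba * ba % nCard) ^ k2 * (ba * ra % nCard)
              ≡ (ba * ba) ^ k2 * (ba * ra) [ZMOD nCard] := ((memod _).pow k2).mul (memod _)
            _ = ba ^ (2 * k2 + 1) * ra := by rw [pow_succ, pow_mul]; ring_nf
        · show ((ba * ba % nCard) ^ k2 * ((ba * rb + bb) % nCard)
              + (ba * bb + bb) % nCard * G (ba * ba % nCard) k2) % nCard
            = (ba ^ (2 * k2 + 1) * rb + bb * G ba (2 * k2 + 1)) % nCard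
          calc (ba * ba % nCard) ^ k2 * ((ba * rb + bb) % nCard)
                + (ba * bb + bb) % nCard * G (ba * ba % nCard) k2
              ≡ (ba * ba) ^ k2 * (ba * rb + bb) + (ba * bb + bb) * G (ba * ba) k2 [ZMOD nCard] :=
                (((memod _).pow k2).mul (memod _)).add ((memod _).mul (G_modeq (memod _) k2))
            _ = ba ^ (2 * k2 + 1) * rb + bb * G ba (2 * k2 + 1) := by
                rw [G_succ_right, G_double, pow_succ, pow_mul]; ring
      · rw [if_neg hpar, if_neg hpar, ih _ hk2 (m / 2) rfl h2]
        have h2k : m.toNat = 2 * (m / 2).toNat := by omega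
        rw [h2k]
        set k2 := (m / 2).toNat with hk2def
        refine Prod.ext ?_ ?_
        · show (ba * ba % nCard) ^ k2 * ra % nCard = ba ^ (2 * k2) * ra % nCard
          calc (ba * ba % nCard) ^ k2 * ra
              ≡ (ba * ba) ^ k2 * ra [ZMOD nCard] := ((memod _).pow k2).mul (Int.ModEq.refl ra)
            _ = ba ^ (2 * k2) * ra := by rw [pow_mul]; ring_nf
        · show ((ba * ba % nCard) ^ k2 * rb + (ba * bb + bb) % nCard * G (ba * ba % nCard) k2) % nCard
            = (ba ^ (2 * k2) * rb + bb * G ba (2 * k2)) % nCard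
          calc (ba * ba % nCard) ^ k2 * rb + (ba * bb + bb) % nCard * G (ba * ba % nCard) k2
              ≡ (ba * ba) ^ k2 * rb + (ba * bb + bb) * G (ba * ba) k2 [ZMOD nCard] :=
                (((memod _).pow k2).mul (Int.ModEq.refl rb)).add ((memod _).mul (G_modeq (memod _) k2))
            _ = ba ^ (2 * k2) * rb + bb * G ba (2 * k2) := by rw [G_double, pow_mul]; ring

-- ===== VERDICT (by name: the statement is the Claim_ definition above) =====
theorem polynompow_spec : Claim_equal_polynompow := by
  intro a b m _ hpre
  show polynompow a b m = polynompow_alt a b m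
  unfold polynompow_alt
  by_cases h0 : m = 0
  · subst h0
    rw [polynompow, if_pos rfl, polynompowLoop, if_pos (by norm_num)]
  · have hm : (1 : Int) ≤ m := by
      have : (0 : Int) ≤ m := hpre
      omega
    rw [A_closed m.toNat m rfl hm, B_closed m.toNat m rfl hm]
    refine Prod.ext ?_ ?_
    · show a ^ m.toNat % nCard = a ^ m.toNat * 1 % nCard; ring_nf
    · show b * G a m.toNat % nCard = (a ^ m.toNat * 0 + b * G a m.toNat) % nCard; ring_nf
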